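-- pv_equiv track=rewrite | github.com/JiaxuanYou/G2SAT | eval/evaluate_graphs.py | pure_variables
-- ===== SOURCE A (Python) =====
-- def pure_variables(formula, num_vars):
--     lst = [0] * num_vars
--     num_pure = 0
--     for line in formula:
--         for ele in line:
--             if ele > 0 and (lst[ele - 1] == 0 or lst[ele - 1] == 2):
--                 lst[ele - 1] += 3 # if pos, add three to lst[ele - 1]
--             if ele < 0 and (lst[abs(ele) - 1] == 0 or lst[abs(ele) - 1] == 3):
--                 lst[abs(ele) - 1] += 2 #if neg, add two to lst[ele - 1]
--     for i in range(len(lst)):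
--         if lst[i] == 2 or lst[i] == 3:
--             num_pure += 1
--     return [num_pure]
-- ===== SOURCE B (Python) =====
-- def pure_variables(formula, num_vars):
--     lits = {e for clause in formula for e in clause if e != 0}
--     pure = [False] * num_vars
--     for e in lits:
--         pure[abs(e) - 1] = -e not in lits
--     return [sum(pure)]
-- ===== Notes on version B (the rewrite author's own statement) =====
-- stated objective: alternative
-- what changed: Replaces A's per-occurrence 4-state arithmetic accumulator and final state scan by a set of distinct literals, a purity test per distinct literal (its negation is absent from the set), and a sum of the marks.
import Mathlib
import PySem

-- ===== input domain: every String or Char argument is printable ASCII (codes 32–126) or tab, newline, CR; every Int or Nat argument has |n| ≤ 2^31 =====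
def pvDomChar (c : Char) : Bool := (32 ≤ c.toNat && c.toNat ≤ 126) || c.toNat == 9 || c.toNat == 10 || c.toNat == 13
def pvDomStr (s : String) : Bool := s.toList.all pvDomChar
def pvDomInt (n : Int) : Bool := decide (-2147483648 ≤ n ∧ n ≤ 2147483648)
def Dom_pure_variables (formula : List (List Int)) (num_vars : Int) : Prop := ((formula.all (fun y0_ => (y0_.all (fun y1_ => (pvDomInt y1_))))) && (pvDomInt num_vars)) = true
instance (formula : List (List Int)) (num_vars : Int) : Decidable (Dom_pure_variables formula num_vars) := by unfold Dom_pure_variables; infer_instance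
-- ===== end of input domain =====

-- B replaces A's per-occurrence 4-state arithmetic accumulator and final state scan by
-- the set of distinct literals and a negation-membership purity test per literal (alternative).

-- ===== PORT A =====
-- one literal of A's inner loop body; the getD default -1 is never read inside Pre_
def pvStepA (lst : List Int) (ele : Int) : List Int :=
  let lst :=
    if ele > 0 ∧ (lst.getD (ele - 1).toNat (-1) = 0 ∨ lst.getD (ele - 1).toNat (-1) = 2)
    then lst.set (ele - 1).toNat (lst.getD (ele - 1).toNat (-1) + 3) else lst
  if ele < 0 ∧ (lst.getD (-ele - 1).toNat (-1) = 0 ∨ lst.getD (-ele - 1).toNat (-1) = 3)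
  then lst.set (-ele - 1).toNat (lst.getD (-ele - 1).toNat (-1) + 2) else lst

def pure_variables (formula : List (List Int)) (num_vars : Int) : List Int :=
  let lst := formula.foldl (fun l line => line.foldl pvStepA l) (List.replicate num_vars.toNat 0)
  let num_pure := lst.foldl (fun n x => if x = 2 ∨ x = 3 then n + 1 else n) (0 : Int)
  [num_pure]

-- ===== PORT B =====
-- {e for clause in formula for e in clause if e != 0}
def pvLits (formula : List (List Int)) : PySem.Set Int :=
  formula.foldl (fun s clause => clause.foldl (fun s e => if e ≠ 0 then PySem.Set.add s e else s) s) PySem.Set.empty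

-- 'for e in lits: pure[abs(e) - 1] = -e not in lits'; the written value depends only on
-- set membership, so the result is independent of the set's iteration order
def pure_variables_alt (formula : List (List Int)) (num_vars : Int) : List Int :=
  let lits := pvLits formula
  let pure := lits.foldl (fun p e => p.set (e.natAbs - 1) (decide ((-e) ∉ lits))) (List.replicate num_vars.toNat false)
  [(pure.countP (fun b => b) : Int)]

-- ===== PRECONDITION & SPEC =====
-- Pre_ excludes exactly the inputs on which both Pythons raise IndexError: a nonzero
-- literal whose absolute value exceeds num_vars.
def Pre_pure_variables (formula : List (List Int)) (num_vars : Int) : Prop :=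
  ∀ line ∈ formula, ∀ ele ∈ line, ele = 0 ∨ (ele.natAbs : Int) ≤ num_vars
instance (formula : List (List Int)) (num_vars : Int) : Decidable (Pre_pure_variables formula num_vars) := by unfold Pre_pure_variables; infer_instance
def pvWitness_pure_variables : List (List Int) × Int := ([[1, -2], [2, -1, 3]], 3)

def Spec_pure_variables (formula : List (List Int)) (num_vars : Int) (out : List Int) : Prop := out = pure_variables_alt formula num_vars
instance (formula : List (List Int)) (num_vars : Int) (out : List Int) : Decidable (Spec_pure_variables formula num_vars out) := by unfold Spec_pure_variables; infer_instance

-- ===== CLAIM (what is proved, stated in full; the proofs are below) =====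
def Claim_equal_pure_variables : Prop := ∀ (formula : List (List Int)) (num_vars : Int), Dom_pure_variables formula num_vars → Pre_pure_variables formula num_vars → Spec_pure_variables formula num_vars (pure_variables formula num_vars)

-- ===== LEMMAS AND PROOFS =====

-- A's state integer for a variable whose positive literal occurs iff p and negative iff q
def pvEnc (p q : Bool) : Int := if p then (if q then 5 else 3) else (if q then 2 else 0)

-- the list A maintains, expressed through membership in the set of literals seen so far
def pvModel (n : Nat) (L : List Int) : List Int :=
  (List.range n).map (fun i : Nat => pvEnc (decide (((i : Int) + 1) ∈ L)) (decide ((-((i : Int) + 1)) ∈ L)))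

theorem pvModel_init (n : Nat) : pvModel n [] = List.replicate n 0 := by
  simp only [pvModel, List.not_mem_nil, decide_false]
  simp [pvEnc, List.map_const']

theorem pvModel_length (n : Nat) (L : List Int) : (pvModel n L).length = n := by
  simp [pvModel]

theorem pvModel_getD (n : Nat) (L : List Int) (i : Nat) (h : i < n) (d : Int) :
    (pvModel n L).getD i d = pvEnc (decide (((i : Int) + 1) ∈ L)) (decide ((-((i : Int) + 1)) ∈ L)) := by
  rw [List.getD_eq_getElem?_getD, List.getElem?_eq_getElem (by simpa [pvModel_length] using h)]
  simp only [pvModel, List.getElem_map, List.getElem_range, Option.getD_some]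

theorem pv_set_map_range {α : Type} (n i0 : Nat) (f : Nat → α) (v : α) :
    ((List.range n).map f).set i0 v = (List.range n).map (fun i => if i = i0 then v else f i) := by
  apply List.ext_getElem (by simp)
  intro i h1 h2
  simp only [List.getElem_set, List.getElem_map, List.getElem_range]
  rcases eq_or_ne i0 i with he | he
  · simp [he]
  · simp [he, Ne.symm he]

theorem pvStepA_pos (lst : List Int) (ele : Int) (h : ele > 0) :
    pvStepA lst ele =
      if lst.getD (ele - 1).toNat (-1) = 0 ∨ lst.getD (ele - 1).toNat (-1) = 2
      then lst.set (ele - 1).toNat (lst.getD (ele - 1).toNat (-1) + 3) else lst := by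
  simp only [pvStepA]
  rw [if_neg (fun hc => absurd hc.1 (by omega))]
  by_cases hP : lst.getD (ele - 1).toNat (-1) = 0 ∨ lst.getD (ele - 1).toNat (-1) = 2
  · rw [if_pos ⟨h, hP⟩, if_pos hP]
  · rw [if_neg (fun hc => hP hc.2), if_neg hP]

theorem pvStepA_neg (lst : List Int) (ele : Int) (h : ele < 0) :
    pvStepA lst ele =
      if lst.getD (-ele - 1).toNat (-1) = 0 ∨ lst.getD (-ele - 1).toNat (-1) = 3
      then lst.set (-ele - 1).toNat (lst.getD (-ele - 1).toNat (-1) + 2) else lst := by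
  simp only [pvStepA]
  have h1 : ¬(ele > 0 ∧ (lst.getD (ele - 1).toNat (-1) = 0 ∨ lst.getD (ele - 1).toNat (-1) = 2)) :=
    fun hc => absurd hc.1 (by omega)
  rw [if_neg h1]
  by_cases hP : lst.getD (-ele - 1).toNat (-1) = 0 ∨ lst.getD (-ele - 1).toNat (-1) = 3
  · rw [if_pos ⟨h, hP⟩, if_pos hP]
  · rw [if_neg (fun hc => hP hc.2), if_neg hP]

theorem pvStepA_zero (lst : List Int) : pvStepA lst 0 = lst := by
  simp [pvStepA]

-- one literal: A's update on the model is B's conditional set insertion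
theorem pvStepA_model (n : Nat) (L : List Int) (ele : Int)
    (hr : ele = 0 ∨ (ele.natAbs : Int) ≤ (n : Int)) :
    pvStepA (pvModel n L) ele =
      pvModel n (if ele ≠ 0 then PySem.Set.add L ele else L) := by
  rcases lt_trichotomy ele 0 with hneg | h0 | hpos
  · -- negative literal
    have hn : (-ele - 1).toNat < n := by omega
    have hcast : ((((-ele - 1).toNat : Int)) + 1) = -ele := by omega
    rw [if_pos (by omega), pvStepA_neg _ _ hneg, pvModel_getD n L _ hn, hcast]
    have hcast2 : (-(-ele)) = ele := by ring
    rw [hcast2]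
    by_cases hm : ele ∈ L
    · rw [decide_eq_true hm, PySem.Set.add_of_mem hm,
        if_neg (by rcases hb : decide (-ele ∈ L) <;> simp [hb, pvEnc])]
    · rw [decide_eq_false hm,
        if_pos (by rcases hb : decide (-ele ∈ L) <;> simp [hb, pvEnc])]
      simp only [pvModel]
      rw [pv_set_map_range]
      apply List.map_congr_left
      intro i hi
      simp only [List.mem_range] at hi
      by_cases hie : i = (-ele - 1).toNat
      · subst hie
        rw [if_pos rfl, hcast, hcast2]
        have h1 : (ele ∈ PySem.Set.add L ele) := (PySem.Set.mem_add _ _ _).2 (Or.inr rfl)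
        have h2 : (-ele ∈ PySem.Set.add L ele) ↔ (-ele ∈ L) := by
          rw [PySem.Set.mem_add]
          exact or_iff_left (by omega)
        rw [decide_eq_true h1, decide_eq_decide.mpr h2]
        rcases hb : decide (-ele ∈ L) <;> simp [hb, pvEnc]
      · rw [if_neg hie]
        have e1 : (((i : Int) + 1) ∈ PySem.Set.add L ele) ↔ (((i : Int) + 1) ∈ L) := by
          rw [PySem.Set.mem_add]
          exact or_iff_left (by omega)
        have e2 : ((-((i : Int) + 1)) ∈ PySem.Set.add L ele) ↔ ((-((i : Int) + 1)) ∈ L) := by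
          rw [PySem.Set.mem_add]
          refine or_iff_left ?_
          intro hc
          apply hie
          omega
        rw [decide_eq_decide.mpr e1, decide_eq_decide.mpr e2]
  · subst h0
    rw [pvStepA_zero]
    simp
  · -- positive literal
    have hn : (ele - 1).toNat < n := by omega
    have hcast : ((((ele - 1).toNat : Int)) + 1) = ele := by omega
    rw [if_pos (by omega), pvStepA_pos _ _ hpos, pvModel_getD n L _ hn, hcast]
    by_cases hm : ele ∈ L
    · rw [decide_eq_true hm, PySem.Set.add_of_mem hm,
        if_neg (by rcases hb : decide (-ele ∈ L) <;> simp [hb, pvEnc])]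
    · rw [decide_eq_false hm,
        if_pos (by rcases hb : decide (-ele ∈ L) <;> simp [hb, pvEnc])]
      simp only [pvModel]
      rw [pv_set_map_range]
      apply List.map_congr_left
      intro i hi
      simp only [List.mem_range] at hi
      by_cases hie : i = (ele - 1).toNat
      · subst hie
        rw [if_pos rfl, hcast]
        have h1 : (ele ∈ PySem.Set.add L ele) := (PySem.Set.mem_add _ _ _).2 (Or.inr rfl)
        have h2 : (-ele ∈ PySem.Set.add L ele) ↔ (-ele ∈ L) := by
          rw [PySem.Set.mem_add]
          exact or_iff_left (by omega)
        rw [decide_eq_true h1, decide_eq_decide.mpr h2]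
        rcases hb : decide (-ele ∈ L) <;> simp [hb, pvEnc]
      · rw [if_neg hie]
        have e1 : (((i : Int) + 1) ∈ PySem.Set.add L ele) ↔ (((i : Int) + 1) ∈ L) := by
          rw [PySem.Set.mem_add]
          refine or_iff_left ?_
          intro hc
          apply hie
          omega
        have e2 : ((-((i : Int) + 1)) ∈ PySem.Set.add L ele) ↔ ((-((i : Int) + 1)) ∈ L) := by
          rw [PySem.Set.mem_add]
          exact or_iff_left (by omega)
        rw [decide_eq_decide.mpr e1, decide_eq_decide.mpr e2]

-- one clause
theorem pv_clause_model (clause : List Int) (n : Nat) :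
    ∀ (L : List Int), (∀ e ∈ clause, e = 0 ∨ (e.natAbs : Int) ≤ (n : Int)) →
    clause.foldl pvStepA (pvModel n L) =
      pvModel n (clause.foldl (fun s e => if e ≠ 0 then PySem.Set.add s e else s) L) := by
  induction clause with
  | nil => intro L _; rfl
  | cons e rest ih =>
    intro L hb
    simp only [List.foldl_cons]
    rw [pvStepA_model n L e (hb e (by simp))]
    exact ih _ (fun x hx => hb x (by simp [hx]))

-- the whole formula: A's array is the model of B's literal set
theorem pv_formula_model (formula : List (List Int)) (n : Nat) :
    ∀ (L : List Int), (∀ c ∈ formula, ∀ e ∈ c, e = 0 ∨ (e.natAbs : Int) ≤ (n : Int)) →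
    formula.foldl (fun l line => line.foldl pvStepA l) (pvModel n L) =
      pvModel n (formula.foldl (fun s clause => clause.foldl (fun s e => if e ≠ 0 then PySem.Set.add s e else s) s) L) := by
  induction formula with
  | nil => intro L _; rfl
  | cons c rest ih =>
    intro L hb
    simp only [List.foldl_cons]
    rw [pv_clause_model c n L (hb c (by simp))]
    exact ih _ (fun x hx e he => hb x (by simp [hx]) e he)

-- bounds of B's literal set
theorem pv_clause_bounds (clause : List Int) (n : Nat) :
    ∀ (L : List Int), (∀ e ∈ clause, e = 0 ∨ (e.natAbs : Int) ≤ (n : Int)) →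
    (∀ v ∈ L, v ≠ 0 ∧ (v.natAbs : Int) ≤ (n : Int)) →
    (∀ v ∈ clause.foldl (fun s e => if e ≠ 0 then PySem.Set.add s e else s) L, v ≠ 0 ∧ (v.natAbs : Int) ≤ (n : Int)) := by
  induction clause with
  | nil => intro L _ hv; exact hv
  | cons e rest ih =>
    intro L hb hv
    simp only [List.foldl_cons]
    by_cases he : e ≠ 0
    · rw [if_pos he]
      refine ih _ (fun x hx => hb x (by simp [hx])) ?_
      intro v hvm
      rcases (PySem.Set.mem_add _ _ _).1 hvm with h | h
      · exact hv v h
      · rcases hb e (by simp) with h0 | hle <;> constructor <;> omega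
    · rw [if_neg he]
      exact ih _ (fun x hx => hb x (by simp [hx])) hv

theorem pvLits_bounds (formula : List (List Int)) (n : Nat)
    (hb : ∀ c ∈ formula, ∀ e ∈ c, e = 0 ∨ (e.natAbs : Int) ≤ (n : Int)) :
    ∀ v ∈ pvLits formula, v ≠ 0 ∧ (v.natAbs : Int) ≤ (n : Int) := by
  unfold pvLits
  suffices h : ∀ (L : List Int), (∀ v ∈ L, v ≠ 0 ∧ (v.natAbs : Int) ≤ (n : Int)) →
      (∀ c ∈ formula, ∀ e ∈ c, e = 0 ∨ (e.natAbs : Int) ≤ (n : Int)) →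
      (∀ v ∈ formula.foldl (fun s clause => clause.foldl (fun s e => if e ≠ 0 then PySem.Set.add s e else s) s) L, v ≠ 0 ∧ (v.natAbs : Int) ≤ (n : Int)) by
    exact h [] (by simp) hb
  clear hb
  induction formula with
  | nil => intro L hv _; exact hv
  | cons c rest ih =>
    intro L hv hb
    simp only [List.foldl_cons]
    exact ih _ (pv_clause_bounds c n L (hb c (by simp)) hv) (fun x hx e he => hb x (by simp [hx]) e he)

-- the flag written for variable i+1 after processing the prefix pr of the literal set L
def pvFlag (L pr : List Int) (i : Nat) : Bool :=
  if ((i : Int) + 1) ∈ pr then decide ((-((i : Int) + 1)) ∉ L)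
  else if (-((i : Int) + 1)) ∈ pr then decide (((i : Int) + 1) ∉ L)
  else false

-- B's marking loop over the literal set, tracked against the processed prefix
theorem pv_mark_fold (L : List Int) (n : Nat) : ∀ (r pr : List Int),
    pr ++ r = L → (∀ v ∈ L, v ≠ 0 ∧ (v.natAbs : Int) ≤ (n : Int)) →
    r.foldl (fun p e => p.set (e.natAbs - 1) (decide ((-e) ∉ L))) ((List.range n).map (pvFlag L pr)) =
      (List.range n).map (pvFlag L L) := by
  intro r
  induction r with
  | nil =>
    intro pr hpr _
    simp only [List.foldl_nil]
    rw [show pr = L by simpa using hpr]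
  | cons e rest ih =>
    intro pr hpr hbnd
    simp only [List.foldl_cons]
    have heL : e ∈ L := by rw [← hpr]; simp
    obtain ⟨hne, hle⟩ := hbnd e heL
    have hi0 : e.natAbs - 1 < n := by omega
    have hset : ((List.range n).map (pvFlag L pr)).set (e.natAbs - 1) (decide ((-e) ∉ L))
        = (List.range n).map (pvFlag L (pr ++ [e])) := by
      rw [pv_set_map_range]
      apply List.map_congr_left
      intro i hi
      simp only [List.mem_range] at hi
      by_cases hie : i = e.natAbs - 1
      · subst hie
        rw [if_pos rfl]
        rcases lt_or_gt_of_ne hne with heneg | hepos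
        · -- e < 0: e = -(i+1)
          have hei : e = -(((e.natAbs - 1 : Nat) : Int) + 1) := by omega
          unfold pvFlag
          have h1 : -e = (((e.natAbs - 1 : Nat) : Int) + 1) := by omega
          by_cases hp : (((e.natAbs - 1 : Nat) : Int) + 1) ∈ pr ++ [e]
          · rw [if_pos hp]
            have hpL : (((e.natAbs - 1 : Nat) : Int) + 1) ∈ L := by
              rw [← hpr]
              rcases List.mem_append.1 hp with h | h
              · exact List.mem_append.2 (Or.inl h)
              · simp at h; omega
            rw [h1, ← hei, decide_eq_false (not_not_intro hpL), decide_eq_false (not_not_intro heL)]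
          · rw [if_neg hp, if_pos (by rw [← hei]; simp), h1]
        · -- e > 0: e = i+1
          have hei : e = (((e.natAbs - 1 : Nat) : Int) + 1) := by omega
          unfold pvFlag
          rw [if_pos (by rw [← hei]; simp), ← hei]
      · rw [if_neg hie]
        unfold pvFlag
        have h1 : (((i : Int) + 1) ∈ pr ++ [e]) ↔ (((i : Int) + 1) ∈ pr) := by
          simp only [List.mem_append, List.mem_singleton]
          exact or_iff_left (by omega)
        have h2 : ((-((i : Int) + 1)) ∈ pr ++ [e]) ↔ ((-((i : Int) + 1)) ∈ pr) := by
          simp only [List.mem_append, List.mem_singleton]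
          exact or_iff_left (by omega)
        by_cases hp : ((i : Int) + 1) ∈ pr
        · rw [if_pos (h1.2 hp), if_pos hp]
        · rw [if_neg (fun hc => hp (h1.1 hc)), if_neg hp]
          by_cases hq : (-((i : Int) + 1)) ∈ pr
          · rw [if_pos (h2.2 hq), if_pos hq]
          · rw [if_neg (fun hc => hq (h2.1 hc)), if_neg hq]
    rw [hset, ih (pr ++ [e]) (by simpa using hpr) hbnd]

theorem pvFlag_init (L : List Int) (n : Nat) :
    (List.range n).map (pvFlag L []) = List.replicate n false := by
  have h : ∀ i, pvFlag L [] i = false := by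
    intro i
    simp [pvFlag]
  calc (List.range n).map (pvFlag L [])
      = (List.range n).map (fun _ => false) := List.map_congr_left (fun i _ => h i)
    _ = List.replicate n false := by simp [List.map_const']

-- A's counting loop is a countP
theorem pv_count_foldl (lst : List Int) : ∀ (c : Int),
    lst.foldl (fun n x => if x = 2 ∨ x = 3 then n + 1 else n) c
      = c + (lst.countP (fun x => decide (x = 2 ∨ x = 3)) : Int) := by
  induction lst with
  | nil => intro c; simp
  | cons x rest ih =>
    intro c
    simp only [List.foldl_cons, List.countP_cons, ih]
    by_cases hx : x = 2 ∨ x = 3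
    · simp [hx]
      omega
    · simp [hx]

theorem pvEnc_pure_iff (p q : Bool) :
    decide (pvEnc p q = 2 ∨ pvEnc p q = 3) = (p != q) := by
  rcases p <;> rcases q <;> decide

-- pointwise: the final flag is 'exactly one polarity occurs'
theorem pvFlag_final (L : List Int) (i : Nat) :
    pvFlag L L i = (decide (((i : Int) + 1) ∈ L) != decide ((-((i : Int) + 1)) ∈ L)) := by
  unfold pvFlag
  by_cases hp : ((i : Int) + 1) ∈ L
  · rw [if_pos hp, decide_eq_true hp]
    rcases hq : decide ((-((i : Int) + 1)) ∈ L) <;> simp_all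
  · rw [if_neg hp, decide_eq_false hp]
    by_cases hq : (-((i : Int) + 1)) ∈ L
    · rw [if_pos hq, decide_eq_true hq, decide_eq_true (by exact hp)]
      rfl
    · rw [if_neg hq, decide_eq_false hq]
      rfl

-- both counts reduce to the same countP over the variable range
theorem pvModel_countP (n : Nat) (L : List Int) :
    (pvModel n L).countP (fun x => decide (x = 2 ∨ x = 3))
      = ((List.range n).map (pvFlag L L)).countP (fun b => b) := by
  rw [pvModel, List.countP_map, List.countP_map]
  apply List.countP_congr
  intro i _
  simp only [Function.comp]
  rw [pvEnc_pure_iff, pvFlag_final]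

-- ===== VERDICT (by name: the statement is the Claim_ definition above) =====
theorem pure_variables_spec : Claim_equal_pure_variables := by
  intro formula num_vars _ hpre
  unfold Spec_pure_variables pure_variables pure_variables_alt
  set n := num_vars.toNat with hn
  have hb : ∀ c ∈ formula, ∀ e ∈ c, e = 0 ∨ (e.natAbs : Int) ≤ (n : Int) := by
    intro c hc e he
    rcases hpre c hc e he with h0 | hle
    · exact Or.inl h0
    · right; omega
  have hfold : formula.foldl (fun l line => line.foldl pvStepA l) (List.replicate n 0)
      = pvModel n (pvLits formula) := by
    have h2 := pv_formula_model formula n [] hb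
    rw [pvModel_init] at h2
    exact h2
  have hmark : (pvLits formula).foldl
        (fun p e => p.set (e.natAbs - 1) (decide ((-e) ∉ pvLits formula))) (List.replicate n false)
      = (List.range n).map (pvFlag (pvLits formula) (pvLits formula)) := by
    rw [← pvFlag_init (pvLits formula) n]
    exact pv_mark_fold (pvLits formula) n (pvLits formula) [] (by simp) (pvLits_bounds formula n hb)
  simp only [hfold, hmark, pv_count_foldl, pvModel_countP]
  norm_num
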